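-- pv_equiv track=rewrite | github.com/lumarcinkowski/dogFACS | detect_emotions/detect_emotions_FACS_yolov8_video.py | predict_emotion
-- ===== SOURCE A (Python) =====
-- dag_emotions = {
--     1: {'jezyk': 7, 'else': 2},
--     2: {'szczeka': 4, 'else': 3},
--     3: {'kly': 6, 'else': 5},
--     4: {
--         'condition': lambda x: not(x['szczeka'] and all(not x[key] for key in x if key != 'szczeka')),
--         'true': 10,
--         'else': "Raczej wesoly"
--     },
--     5: {'uszy_tyl': 9, 'else': 8},
--     6: {'nos': "Zdenerwowany", 'else': 9},
--     7: {'kly': "Neutralny", 'else': "Wesoly"},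
--     8: {'smutne_oczy': 13, 'else': 11},
--     9: {'grozne_oczy': "Zdenerwowany", 'else': 16},
--     10: {'wesole_oczy': "Wesoly", 'else': 3},
--     11: {'uszy_przod': 14, 'else': "Neutralny"},
--     12: {'uszy_przod': "Smutny", 'else': 15},
--     13: {
--         'condition': lambda x: not(x['smutne_oczy'] and all(not x[key] for key in x if key != 'smutne_oczy')),
--         'true': 12,
--         'else': "Raczej smutny"
--     },
--     14: {'usta': "Smutny", 'else': "Neutralny"},
--     15: {'usta': "Smutny", 'else': "Neutralny"},
--     16: {
--         'condition': lambda x: (x['kly'] and all(not x[key] for key in x if key != 'kly')),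
--         'true': "Raczej zdenerwowany",
--         'else': 8
--     }
-- }
--
-- def predict_emotion(features):
--     current_node = 1
--
--     while current_node is not None:
--         if isinstance(current_node, str):
--             return current_node
--
--         node_info = dag_emotions.get(current_node)
--
--         if not node_info:
--             return "Błąd: Nieprawidłowy węzeł grafu"
--
--         if 'condition' in node_info:
--             if node_info['condition'](features):
--                 current_node = node_info['true']
--             else:
--                 current_node = node_info['else']
--         else:
--             for feature, next_node in node_info.items():
--                 if feature in features and features[feature]:
--                     current_node = next_node
--                     break
--             else:
--                 current_node = node_info['else']
--
--     return "Neutralny"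
-- ===== SOURCE B (Python) =====
-- def predict_emotion(features):
--     get = features.get
--
--     def any_other(exclude):
--         return any(v for k, v in features.items() if k != exclude)
--
--     def node8():
--         if get('smutne_oczy'):
--             if any_other('smutne_oczy'):            # node 13 condition
--                 if get('uszy_przod'):               # node 12
--                     return "Smutny"
--                 return "Smutny" if get('usta') else "Neutralny"   # node 15
--             return "Raczej smutny"
--         if get('uszy_przod'):                       # node 11 -> 14
--             return "Smutny" if get('usta') else "Neutralny"
--         return "Neutralny"
--
--     def node9():
--         if get('grozne_oczy'):
--             return "Zdenerwowany"
--         if get('kly') and not any_other('kly'):     # node 16 condition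
--             return "Raczej zdenerwowany"
--         return node8()
--
--     def node3():
--         if get('kly'):
--             return "Zdenerwowany" if get('nos') else node9()     # node 6
--         return node9() if get('uszy_tyl') else node8()           # node 5
--
--     if get('jezyk'):
--         return "Neutralny" if get('kly') else "Wesoly"           # node 7
--     if get('szczeka'):
--         if any_other('szczeka'):                    # node 4 condition
--             if get('wesole_oczy'):                  # node 10
--                 return "Wesoly"
--             return node3()
--         return "Raczej wesoly"
--     return node3()
-- ===== Notes on version B (the rewrite author's own statement) =====
-- stated objective: simpler
-- what changed: Replaces the dag_emotions table and the generic while-loop graph interpreter with a direct nested if/else decision tree (the three condition lambdas become plain .get/any() tests at their node).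
-- crash fix: On inputs whose features reach node 16 without a 'kly' key (no truthy jezyk; szczeka absent/falsy or its node-4 path falls through; truthy uszy_tyl; no truthy grozne_oczy), A raises KeyError('kly') in the node-16 lambda while B returns the fall-through branch's value (e.g. 'Neutralny'). — e.g. on predict_emotion([("uszy_tyl", true)]): A raises KeyError, B returns "Neutralny"
import Mathlib
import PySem

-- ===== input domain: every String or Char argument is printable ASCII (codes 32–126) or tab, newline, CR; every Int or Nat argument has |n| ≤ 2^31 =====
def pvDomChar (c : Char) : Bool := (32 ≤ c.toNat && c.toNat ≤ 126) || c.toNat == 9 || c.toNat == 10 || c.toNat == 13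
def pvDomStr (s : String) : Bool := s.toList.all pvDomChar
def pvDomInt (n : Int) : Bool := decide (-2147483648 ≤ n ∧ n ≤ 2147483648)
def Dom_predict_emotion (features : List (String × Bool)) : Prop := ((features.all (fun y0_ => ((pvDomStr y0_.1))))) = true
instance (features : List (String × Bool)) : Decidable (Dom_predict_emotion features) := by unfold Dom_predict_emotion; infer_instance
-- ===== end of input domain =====

-- B replaces the dag_emotions table + generic while-loop interpreter by a direct nested
-- if/else decision tree (objective: simpler). Return-value equivalence only; neither mutates.

-- ===== PORT A =====
inductive NRef : Type
  | num : Int → NRef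
  | str : String → NRef
deriving DecidableEq, Repr

inductive NodeInfo : Type
  | simple : List (String × NRef) → NodeInfo          -- items of the node dict (feature → target, plus the 'else' entry)
  | cond : Int → NRef → NRef → NodeInfo               -- condition node: lambda id, 'true' target, 'else' target
deriving DecidableEq, Repr

def dagEmotions (n : Int) : Option NodeInfo :=
  if n = 1 then some (.simple [("jezyk", .num 7), ("else", .num 2)])
  else if n = 2 then some (.simple [("szczeka", .num 4), ("else", .num 3)])
  else if n = 3 then some (.simple [("kly", .num 6), ("else", .num 5)])
  else if n = 4 then some (.cond 4 (.num 10) (.str "Raczej wesoly"))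
  else if n = 5 then some (.simple [("uszy_tyl", .num 9), ("else", .num 8)])
  else if n = 6 then some (.simple [("nos", .str "Zdenerwowany"), ("else", .num 9)])
  else if n = 7 then some (.simple [("kly", .str "Neutralny"), ("else", .str "Wesoly")])
  else if n = 8 then some (.simple [("smutne_oczy", .num 13), ("else", .num 11)])
  else if n = 9 then some (.simple [("grozne_oczy", .str "Zdenerwowany"), ("else", .num 16)])
  else if n = 10 then some (.simple [("wesole_oczy", .str "Wesoly"), ("else", .num 3)])
  else if n = 11 then some (.simple [("uszy_przod", .num 14), ("else", .str "Neutralny")])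
  else if n = 12 then some (.simple [("uszy_przod", .str "Smutny"), ("else", .num 15)])
  else if n = 13 then some (.cond 13 (.num 12) (.str "Raczej smutny"))
  else if n = 14 then some (.simple [("usta", .str "Smutny"), ("else", .str "Neutralny")])
  else if n = 15 then some (.simple [("usta", .str "Smutny"), ("else", .str "Neutralny")])
  else if n = 16 then some (.cond 16 (.str "Raczej zdenerwowany") (.num 8))
  else none

-- the three condition lambdas; x['k'] is (get? k).getD false: the `none` case is a Python
-- KeyError — reachable only at id 16 with "kly" absent, exactly what Pre_ excludes
def condEval (c : Int) (x : PySem.Dict String Bool) : Bool :=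
  if c = 4 then !(((x.get? "szczeka").getD false) && x.items.all (fun p => p.1 == "szczeka" || !p.2))
  else if c = 13 then !(((x.get? "smutne_oczy").getD false) && x.items.all (fun p => p.1 == "smutne_oczy" || !p.2))
  else if c = 16 then ((x.get? "kly").getD false) && x.items.all (fun p => p.1 == "kly" || !p.2)
  else false

-- the for/else scan: first item whose feature is present-and-truthy, else node_info['else']
def simpleNext (d : PySem.Dict String Bool) (items : List (String × NRef)) : NRef :=
  match items.find? (fun p => d.getD p.1 false) with
  | some p => p.2
  | none => (((items.find? (fun p => p.1 == "else")).map Prod.snd).getD (.str "?"))  -- 'else' always present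

def dagLoop (d : PySem.Dict String Bool) : Nat → NRef → String
  | 0, _ => "Neutralny"                 -- fuel guard (the graph is acyclic; mirrors the unreachable final return)
  | _ + 1, NRef.str s => s
  | n + 1, NRef.num i =>
    match dagEmotions i with
    | none => "Błąd: Nieprawidłowy węzeł grafu"
    | some (NodeInfo.cond c t e) => dagLoop d n (if condEval c d then t else e)
    | some (NodeInfo.simple items) => dagLoop d n (simpleNext d items)

def predict_emotion (features : List (String × Bool)) : String :=
  dagLoop (PySem.Dict.ofList features) 20 (.num 1)

-- ===== PORT B =====
def bGet (d : PySem.Dict String Bool) (k : String) : Bool := d.getD k false  -- features.get(k) truthiness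

def bAnyOther (d : PySem.Dict String Bool) (ex : String) : Bool :=
  d.items.any (fun p => !(p.1 == ex) && p.2)  -- any(v for k, v in features.items() if k != ex)

def bNode8 (d : PySem.Dict String Bool) : String :=
  if bGet d "smutne_oczy" then
    if bAnyOther d "smutne_oczy" then                                     -- node 13
      if bGet d "uszy_przod" then "Smutny"                                -- node 12
      else if bGet d "usta" then "Smutny" else "Neutralny"                -- node 15
    else "Raczej smutny"
  else if bGet d "uszy_przod" then                                        -- node 11 → 14
    if bGet d "usta" then "Smutny" else "Neutralny"
  else "Neutralny"

def bNode9 (d : PySem.Dict String Bool) : String :=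
  if bGet d "grozne_oczy" then "Zdenerwowany"
  else if bGet d "kly" && !(bAnyOther d "kly") then "Raczej zdenerwowany" -- node 16
  else bNode8 d

def bNode3 (d : PySem.Dict String Bool) : String :=
  if bGet d "kly" then
    if bGet d "nos" then "Zdenerwowany" else bNode9 d                     -- node 6
  else if bGet d "uszy_tyl" then bNode9 d else bNode8 d                   -- node 5

def predict_emotion_alt (features : List (String × Bool)) : String :=
  let d := PySem.Dict.ofList features
  if bGet d "jezyk" then
    if bGet d "kly" then "Neutralny" else "Wesoly"                        -- node 7
  else if bGet d "szczeka" then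
    if bAnyOther d "szczeka" then                                         -- node 4
      if bGet d "wesole_oczy" then "Wesoly" else bNode3 d                 -- node 10
    else "Raczej wesoly"
  else bNode3 d

-- ===== PRECONDITION & SPEC =====
-- On inputs whose sober-path conditions reach node 16 without a "kly" key, A raises KeyError
-- ('kly') in the node-16 lambda while B's decision tree returns the value of the fall-through
-- branch; Pre_ excludes exactly those inputs.
def Raises_predict_emotion (features : List (String × Bool)) : Prop :=
  ((PySem.Dict.ofList features).getD "jezyk" false = false) ∧
  (((PySem.Dict.ofList features).getD "szczeka" false = false) ∨
    ((PySem.Dict.ofList features).items.any (fun p => !(p.1 == "szczeka") && p.2) = true ∧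
     (PySem.Dict.ofList features).getD "wesole_oczy" false = false)) ∧
  ((PySem.Dict.ofList features).contains "kly" = false) ∧
  ((PySem.Dict.ofList features).getD "uszy_tyl" false = true) ∧
  ((PySem.Dict.ofList features).getD "grozne_oczy" false = false)

instance (features : List (String × Bool)) : Decidable (Raises_predict_emotion features) := by
  unfold Raises_predict_emotion; infer_instance

-- Pre_ excludes exactly the inputs on which A raises KeyError (node 16 reached with no "kly" key).
def Pre_predict_emotion (features : List (String × Bool)) : Prop :=
  ¬ Raises_predict_emotion features

instance (features : List (String × Bool)) : Decidable (Pre_predict_emotion features) := by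
  unfold Pre_predict_emotion; infer_instance

def pvWitness_predict_emotion : (List (String × Bool)) := [("jezyk", true)]

def pvRaiseWitness_predict_emotion : (List (String × Bool)) := [("uszy_tyl", true)]
def pvRaiseWitnessOut_predict_emotion : String := "Neutralny"

def Spec_predict_emotion (features : List (String × Bool)) (out : String) : Prop := out = predict_emotion_alt features
instance (features : List (String × Bool)) (out : String) : Decidable (Spec_predict_emotion features out) := by unfold Spec_predict_emotion; infer_instance

-- ===== CLAIM (what is proved, stated in full; the proofs are below) =====
def Claim_equal_predict_emotion : Prop := ∀ (features : List (String × Bool)), Dom_predict_emotion features → Pre_predict_emotion features → Spec_predict_emotion features (predict_emotion features)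

def Claim_raises_predict_emotion : Prop := (∀ (features : List (String × Bool)), Dom_predict_emotion features → Raises_predict_emotion features → ¬ Pre_predict_emotion features) ∧ (Dom_predict_emotion (pvRaiseWitness_predict_emotion) ∧ Raises_predict_emotion (pvRaiseWitness_predict_emotion) ∧ predict_emotion_alt (pvRaiseWitness_predict_emotion) = pvRaiseWitnessOut_predict_emotion)

-- ===== LEMMAS AND PROOFS =====

lemma simpleNext_pair (d : PySem.Dict String Bool) (k : String) (t e : NRef)
    (hk : (k == "else") = false) :
    simpleNext d [(k, t), ("else", e)] = if d.getD k false then t else e := by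
  unfold simpleNext
  by_cases h1 : d.getD k false = true <;>
    by_cases h2 : d.getD "else" false = true <;>
      simp [List.find?, h1, h2, hk]

lemma anyOther_eq_not_all (d : PySem.Dict String Bool) (ex : String) :
    d.items.any (fun p => !(p.1 == ex) && p.2) = !(d.items.all fun p => p.1 == ex || !p.2) := by
  induction d.items with
  | nil => rfl
  | cons p l ih => by_cases h : p.1 == ex <;> by_cases h2 : p.2 = true <;> simp [h, h2, ih]

-- one-step unfoldings of the interpreter, one per node of the table
lemma pvStepStr (d : PySem.Dict String Bool) (n : Nat) (s : String) :
    dagLoop d (n + 1) (.str s) = s := rfl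
lemma pvStep1 (d : PySem.Dict String Bool) (n : Nat) :
    dagLoop d (n + 1) (.num 1) = dagLoop d n (if d.getD "jezyk" false then .num 7 else .num 2) := by
  simp [dagLoop, dagEmotions, simpleNext_pair d "jezyk" (NRef.num 7) (NRef.num 2) rfl]
lemma pvStep2 (d : PySem.Dict String Bool) (n : Nat) :
    dagLoop d (n + 1) (.num 2) = dagLoop d n (if d.getD "szczeka" false then .num 4 else .num 3) := by
  simp [dagLoop, dagEmotions, simpleNext_pair d "szczeka" (NRef.num 4) (NRef.num 3) rfl]
lemma pvStep3 (d : PySem.Dict String Bool) (n : Nat) :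
    dagLoop d (n + 1) (.num 3) = dagLoop d n (if d.getD "kly" false then .num 6 else .num 5) := by
  simp [dagLoop, dagEmotions, simpleNext_pair d "kly" (NRef.num 6) (NRef.num 5) rfl]
lemma pvStep4 (d : PySem.Dict String Bool) (n : Nat) :
    dagLoop d (n + 1) (.num 4) = dagLoop d n (if condEval 4 d then .num 10 else .str "Raczej wesoly") := by
  simp [dagLoop, dagEmotions]
lemma pvStep5 (d : PySem.Dict String Bool) (n : Nat) :
    dagLoop d (n + 1) (.num 5) = dagLoop d n (if d.getD "uszy_tyl" false then .num 9 else .num 8) := by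
  simp [dagLoop, dagEmotions, simpleNext_pair d "uszy_tyl" (NRef.num 9) (NRef.num 8) rfl]
lemma pvStep6 (d : PySem.Dict String Bool) (n : Nat) :
    dagLoop d (n + 1) (.num 6) = dagLoop d n (if d.getD "nos" false then .str "Zdenerwowany" else .num 9) := by
  simp [dagLoop, dagEmotions, simpleNext_pair d "nos" (NRef.str "Zdenerwowany") (NRef.num 9) rfl]
lemma pvStep7 (d : PySem.Dict String Bool) (n : Nat) :
    dagLoop d (n + 1) (.num 7) = dagLoop d n (if d.getD "kly" false then .str "Neutralny" else .str "Wesoly") := by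
  simp [dagLoop, dagEmotions, simpleNext_pair d "kly" (NRef.str "Neutralny") (NRef.str "Wesoly") rfl]
lemma pvStep8 (d : PySem.Dict String Bool) (n : Nat) :
    dagLoop d (n + 1) (.num 8) = dagLoop d n (if d.getD "smutne_oczy" false then .num 13 else .num 11) := by
  simp [dagLoop, dagEmotions, simpleNext_pair d "smutne_oczy" (NRef.num 13) (NRef.num 11) rfl]
lemma pvStep9 (d : PySem.Dict String Bool) (n : Nat) :
    dagLoop d (n + 1) (.num 9) = dagLoop d n (if d.getD "grozne_oczy" false then .str "Zdenerwowany" else .num 16) := by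
  simp [dagLoop, dagEmotions, simpleNext_pair d "grozne_oczy" (NRef.str "Zdenerwowany") (NRef.num 16) rfl]
lemma pvStep10 (d : PySem.Dict String Bool) (n : Nat) :
    dagLoop d (n + 1) (.num 10) = dagLoop d n (if d.getD "wesole_oczy" false then .str "Wesoly" else .num 3) := by
  simp [dagLoop, dagEmotions, simpleNext_pair d "wesole_oczy" (NRef.str "Wesoly") (NRef.num 3) rfl]
lemma pvStep11 (d : PySem.Dict String Bool) (n : Nat) :
    dagLoop d (n + 1) (.num 11) = dagLoop d n (if d.getD "uszy_przod" false then .num 14 else .str "Neutralny") := by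
  simp [dagLoop, dagEmotions, simpleNext_pair d "uszy_przod" (NRef.num 14) (NRef.str "Neutralny") rfl]
lemma pvStep12 (d : PySem.Dict String Bool) (n : Nat) :
    dagLoop d (n + 1) (.num 12) = dagLoop d n (if d.getD "uszy_przod" false then .str "Smutny" else .num 15) := by
  simp [dagLoop, dagEmotions, simpleNext_pair d "uszy_przod" (NRef.str "Smutny") (NRef.num 15) rfl]
lemma pvStep13 (d : PySem.Dict String Bool) (n : Nat) :
    dagLoop d (n + 1) (.num 13) = dagLoop d n (if condEval 13 d then .num 12 else .str "Raczej smutny") := by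
  simp [dagLoop, dagEmotions]
lemma pvStep14 (d : PySem.Dict String Bool) (n : Nat) :
    dagLoop d (n + 1) (.num 14) = dagLoop d n (if d.getD "usta" false then .str "Smutny" else .str "Neutralny") := by
  simp [dagLoop, dagEmotions, simpleNext_pair d "usta" (NRef.str "Smutny") (NRef.str "Neutralny") rfl]
lemma pvStep15 (d : PySem.Dict String Bool) (n : Nat) :
    dagLoop d (n + 1) (.num 15) = dagLoop d n (if d.getD "usta" false then .str "Smutny" else .str "Neutralny") := by
  simp [dagLoop, dagEmotions, simpleNext_pair d "usta" (NRef.str "Smutny") (NRef.str "Neutralny") rfl]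
lemma pvStep16 (d : PySem.Dict String Bool) (n : Nat) :
    dagLoop d (n + 1) (.num 16) = dagLoop d n (if condEval 16 d then .str "Raczej zdenerwowany" else .num 8) := by
  simp [dagLoop, dagEmotions]

lemma dagLoop_8 (d : PySem.Dict String Bool) (n : Nat) :
    dagLoop d (n + 5) (.num 8) = bNode8 d := by
  by_cases h1 : (d.get? "smutne_oczy").getD false = true <;>
    by_cases h2 : (d.items.all fun p => p.1 == "smutne_oczy" || !p.2) = true <;>
      by_cases h3 : (d.get? "uszy_przod").getD false = true <;>
        by_cases h4 : (d.get? "usta").getD false = true <;>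
          simp [pvStep8, pvStep13, pvStep12, pvStep11, pvStep14, pvStep15, pvStepStr,
                condEval, bNode8, bGet, bAnyOther, anyOther_eq_not_all,
                PySem.Dict.getD_eq_get?_getD, h1, h2, h3, h4]

lemma dagLoop_9 (d : PySem.Dict String Bool) (n : Nat) :
    dagLoop d (n + 7) (.num 9) = bNode9 d := by
  by_cases h1 : (d.get? "grozne_oczy").getD false = true <;>
    by_cases h2 : (d.get? "kly").getD false = true <;>
      by_cases h3 : (d.items.all fun p => p.1 == "kly" || !p.2) = true <;>
        simp [pvStep9, pvStep16, pvStepStr, condEval, bNode9, bGet, bAnyOther,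
              anyOther_eq_not_all, PySem.Dict.getD_eq_get?_getD, h1, h2, h3, dagLoop_8 d n]

lemma dagLoop_3 (d : PySem.Dict String Bool) (n : Nat) :
    dagLoop d (n + 9) (.num 3) = bNode3 d := by
  by_cases h1 : (d.get? "kly").getD false = true <;>
    by_cases h2 : (d.get? "nos").getD false = true <;>
      by_cases h3 : (d.get? "uszy_tyl").getD false = true <;>
        simp [pvStep3, pvStep6, pvStep5, pvStepStr, bNode3, bGet,
              PySem.Dict.getD_eq_get?_getD, h1, h2, h3, dagLoop_9 d n, dagLoop_8 d (n + 2)]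

lemma dagLoop_top (d : PySem.Dict String Bool) (n : Nat) :
    dagLoop d (n + 13) (.num 1) =
      (if bGet d "jezyk" then
        if bGet d "kly" then "Neutralny" else "Wesoly"
      else if bGet d "szczeka" then
        if bAnyOther d "szczeka" then
          if bGet d "wesole_oczy" then "Wesoly" else bNode3 d
        else "Raczej wesoly"
      else bNode3 d) := by
  by_cases h1 : (d.get? "jezyk").getD false = true <;>
    by_cases h2 : (d.get? "kly").getD false = true <;>
      by_cases h3 : (d.get? "szczeka").getD false = true <;>
        by_cases h4 : (d.items.all fun p => p.1 == "szczeka" || !p.2) = true <;>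
          by_cases h5 : (d.get? "wesole_oczy").getD false = true <;>
            simp [pvStep1, pvStep2, pvStep4, pvStep7, pvStep10, pvStepStr, condEval, bGet,
                  bAnyOther, anyOther_eq_not_all, PySem.Dict.getD_eq_get?_getD,
                  h1, h2, h3, h4, h5, dagLoop_3 d n, dagLoop_3 d (n + 2)]

-- ===== VERDICT (by name: the statement is the Claim_ definition above) =====
theorem predict_emotion_spec : Claim_equal_predict_emotion := by
  intro features _ _
  unfold Spec_predict_emotion predict_emotion predict_emotion_alt
  exact dagLoop_top (PySem.Dict.ofList features) 7

theorem predict_emotion_raises : Claim_raises_predict_emotion := by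
  unfold Claim_raises_predict_emotion
  exact ⟨fun _ _ h hp => hp h, by decide⟩

-- self-check of the raise witness (the grader re-runs both programs there)
theorem pvRaiseWitness_predict_emotion_ok :
    Raises_predict_emotion pvRaiseWitness_predict_emotion ∧
    predict_emotion_alt pvRaiseWitness_predict_emotion = pvRaiseWitnessOut_predict_emotion :=
  ⟨predict_emotion_raises.2.2.1, predict_emotion_raises.2.2.2⟩
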